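-- pv_equiv track=rewrite | github.com/ictcubeMENA/Training_one | codewars/6kyu/amrlotfy77/Combine Fruits/main.py | comb1
-- ===== SOURCE A (Python) =====
-- def comb1(fruits):
--     energy = 0
--     if len(fruits) == 1:
--         return 0
--     while len(fruits) != 1:
--         fruits.sort()
--         delta = sum(fruits[:2])
--         energy += delta
--         fruits = [delta] + fruits[2:]
--     return energy
-- ===== SOURCE B (Python) =====
-- def _make(v, l, r):
--     # leftist node constructor: keep the higher-rank child on the left
--     lr = l[1] if l is not None else 0
--     rr = r[1] if r is not None else 0
--     if lr < rr:
--         l, r = r, l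
--         lr, rr = rr, lr
--     return (v, rr + 1, l, r)
--
--
-- def _merge(a, b):
--     # leftist min-heap merge; node = (value, rank, left, right), None = empty
--     if a is None:
--         return b
--     if b is None:
--         return a
--     if b[0] < a[0]:
--         return _make(b[0], b[2], _merge(b[3], a))
--     return _make(a[0], a[2], _merge(a[3], b))
--
--
-- def comb1(fruits):
--     heap = None
--     for x in fruits:
--         heap = _merge(heap, (x, 1, None, None))
--     energy = 0
--     for _ in range(len(fruits) - 1):
--         m1 = heap[0]
--         heap = _merge(heap[2], heap[3])
--         m2 = heap[0]
--         heap = _merge(heap[2], heap[3])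
--         d = m1 + m2
--         energy += d
--         heap = _merge(heap, (d, 1, None, None))
--     return energy
-- ===== Notes on version B (the rewrite author's own statement) =====
-- stated objective: faster
-- what changed: Replaces the re-sort-the-whole-list-every-round loop with a hand-rolled leftist min-heap (A imports nothing, so heapq is unavailable): pop the two minima, push their sum, accumulate.
import Mathlib
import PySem

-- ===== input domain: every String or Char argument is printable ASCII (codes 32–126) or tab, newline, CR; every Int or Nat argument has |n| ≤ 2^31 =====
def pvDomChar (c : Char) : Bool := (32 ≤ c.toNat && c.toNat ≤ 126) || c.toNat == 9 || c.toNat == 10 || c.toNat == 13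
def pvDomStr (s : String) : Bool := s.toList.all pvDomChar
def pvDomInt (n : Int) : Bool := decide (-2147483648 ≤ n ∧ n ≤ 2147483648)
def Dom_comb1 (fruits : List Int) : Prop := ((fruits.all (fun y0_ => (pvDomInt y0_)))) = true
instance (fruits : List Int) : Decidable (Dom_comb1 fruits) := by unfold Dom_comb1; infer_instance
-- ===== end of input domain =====

-- B replaces A's re-sort-every-round loop with a hand-rolled leftist min-heap (Huffman merge:
-- pop the two minima, push their sum, accumulate).  A sorts its argument list in place
-- (caller-visible mutation); B does not mutate it — the equivalence proved is about the return value.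

-- ===== PORT A =====
-- the while loop: 'while len(fruits) != 1: fruits.sort(); delta = sum(fruits[:2]); energy += delta; fruits = [delta] + fruits[2:]'
-- (fuel only makes the recursion structural; len(fruits)+2 steps always suffice — each round
-- shrinks the list by one, except [] -> [0] which stops one round later — so the 0-fuel branch
-- is never reached on any input)
def comb1Loop : Nat → List Int → Int → Int
  | 0, _, energy => energy
  | fuel + 1, fruits, energy =>
    if fruits.length = 1 then energy
    else
      let s := PySem.List.sorted fruits (fun x => x) false
      let delta := (s.take 2).sum          -- sum(fruits[:2]) (slice [0:2] = take 2, exact)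
      comb1Loop fuel (delta :: s.drop 2) (energy + delta)

def comb1 (fruits : List Int) : Int :=
  if fruits.length = 1 then 0 else comb1Loop (fruits.length + 2) fruits 0

-- ===== PORT B =====
-- node = (value, rank, left, right), None = empty  (a plain inductive mirroring Source B's tuples)
inductive LHeap where
  | nil : LHeap
  | node : Int → Nat → LHeap → LHeap → LHeap

def LHeap.size : LHeap → Nat
  | .nil => 0
  | .node _ _ l r => 1 + l.size + r.size

-- 'l[1] if l is not None else 0'
def LHeap.rank : LHeap → Nat
  | .nil => 0
  | .node _ k _ _ => k

-- _make from Source B (leftist node constructor)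
def mkNode (v : Int) (l r : LHeap) : LHeap :=
  if l.rank < r.rank then .node v (l.rank + 1) r l else .node v (r.rank + 1) l r

-- the two termination measures of _merge, proved by hand (cited by lmerge's decreasing_by)
theorem lmergeDec (x y z : Nat) : z + x < x + (1 + y + z) := by omega

theorem lmergeDec' (x y z : Nat) : z + x < (1 + y + z) + x := by omega

-- _merge from Source B, step for step
def lmerge : LHeap → LHeap → LHeap
  | .nil, b => b
  | a, .nil => a
  | .node av ak al ar, .node bv bk bl br =>
    if bv < av then mkNode bv bl (lmerge br (.node av ak al ar))
    else mkNode av al (lmerge ar (.node bv bk bl br))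
termination_by a b => a.size + b.size
decreasing_by
  · exact lmergeDec (LHeap.size (.node av ak al ar)) bl.size br.size
  · exact lmergeDec' (LHeap.size (.node bv bk bl br)) al.size ar.size

-- 'heap[0]' / 'heap[2], heap[3]'.  Source B's subscript on None would raise, but the loop below never
-- reaches the nil case (the heap holds length(fruits) - iteration ≥ 2 elements there); the nil
-- defaults are dummies, exact on every reachable state.
def LHeap.top : LHeap → Int
  | .nil => 0
  | .node v _ _ _ => v

def LHeap.children : LHeap → LHeap × LHeap
  | .nil => (.nil, .nil)
  | .node _ _ l r => (l, r)

-- one iteration of Source B's 'for _ in range(len(fruits) - 1)' loop body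
def altStep (heap : LHeap) (energy : Int) : LHeap × Int :=
  let m1 := heap.top
  let h1 := lmerge heap.children.1 heap.children.2
  let m2 := h1.top
  let h2 := lmerge h1.children.1 h1.children.2
  let d := m1 + m2
  (lmerge h2 (.node d 1 .nil .nil), energy + d)

-- the counted loop; runs len(fruits) - 1 times (Nat subtraction: zero iterations for len ≤ 1,
-- exactly like Python's empty range(-1) / range(0))
def altLoop : Nat → LHeap → Int → Int
  | 0, _, energy => energy
  | t + 1, heap, energy =>
    let (h', e') := altStep heap energy
    altLoop t h' e'

def comb1_alt (fruits : List Int) : Int :=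
  let heap := fruits.foldl (fun h x => lmerge h (.node x 1 .nil .nil)) .nil
  altLoop (fruits.length - 1) heap 0

-- ===== PRECONDITION & SPEC =====
def Spec_comb1 (fruits : List Int) (out : Int) : Prop := out = comb1_alt fruits
instance (fruits : List Int) (out : Int) : Decidable (Spec_comb1 fruits out) := by unfold Spec_comb1; infer_instance

-- ===== CLAIM (what is proved, stated in full; the proofs are below) =====
def Claim_equal_comb1 : Prop := ∀ (fruits : List Int), Dom_comb1 fruits → Spec_comb1 fruits (comb1 fruits)

-- ===== LEMMAS AND PROOFS =====

def LHeap.toList : LHeap → List Int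
  | .nil => []
  | .node v _ l r => v :: (l.toList ++ r.toList)

def IsHeap : LHeap → Prop
  | .nil => True
  | .node v _ l r => (∀ x ∈ l.toList ++ r.toList, v ≤ x) ∧ IsHeap l ∧ IsHeap r

theorem mkNode_toList_perm (v : Int) (l r : LHeap) :
    (mkNode v l r).toList.Perm (v :: (l.toList ++ r.toList)) := by
  unfold mkNode; split <;> simp [LHeap.toList]
  exact List.perm_append_comm

theorem lmerge_perm (a b : LHeap) : (lmerge a b).toList.Perm (a.toList ++ b.toList) := by
  fun_induction lmerge a b with
  | case1 => simp [LHeap.toList]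
  | case2 => simp [LHeap.toList]
  | case3 av ak al ar bv bk bl br hlt ih =>
    refine (mkNode_toList_perm _ _ _).trans ?_
    rw [List.perm_iff_count] at ih ⊢
    intro x; have h2 := ih x
    simp [LHeap.toList, List.count_append, List.count_cons] at h2 ⊢
    omega
  | case4 av ak al ar bv bk bl br hlt ih =>
    refine (mkNode_toList_perm _ _ _).trans ?_
    rw [List.perm_iff_count] at ih ⊢
    intro x; have h2 := ih x
    simp [LHeap.toList, List.count_append, List.count_cons] at h2 ⊢
    omega

theorem mem_lmerge {x : Int} {a b : LHeap} :
    x ∈ (lmerge a b).toList ↔ x ∈ a.toList ∨ x ∈ b.toList := by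
  rw [(lmerge_perm a b).mem_iff, List.mem_append]

theorem mkNode_isHeap {v : Int} {l r : LHeap}
    (hl : IsHeap l) (hr : IsHeap r)
    (hv : ∀ x ∈ l.toList ++ r.toList, v ≤ x) : IsHeap (mkNode v l r) := by
  unfold mkNode; split
  · exact ⟨fun x hx => hv x (by rw [List.mem_append] at hx ⊢; tauto), hr, hl⟩
  · exact ⟨hv, hl, hr⟩

theorem lmerge_isHeap {a b : LHeap} (ha : IsHeap a) (hb : IsHeap b) : IsHeap (lmerge a b) := by
  fun_induction lmerge a b with
  | case1 => exact hb
  | case2 => exact ha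
  | case3 av ak al ar bv bk bl br hlt ih =>
    obtain ⟨hav, hal, har⟩ := ha
    obtain ⟨hbv, hbl, hbr⟩ := hb
    refine mkNode_isHeap hbl (ih hbr ⟨hav, hal, har⟩) ?_
    intro x hx
    rcases List.mem_append.mp hx with h | h
    · exact hbv x (List.mem_append_left _ h)
    · rcases mem_lmerge.mp h with h | h
      · exact hbv x (List.mem_append_right _ h)
      · rcases (by simpa [LHeap.toList] using h : x = av ∨ x ∈ al.toList ∨ x ∈ ar.toList) with rfl | h | h
        · exact le_of_lt hlt
        · exact le_trans (le_of_lt hlt) (hav x (List.mem_append_left _ h))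
        · exact le_trans (le_of_lt hlt) (hav x (List.mem_append_right _ h))
  | case4 av ak al ar bv bk bl br hlt ih =>
    obtain ⟨hav, hal, har⟩ := ha
    obtain ⟨hbv, hbl, hbr⟩ := hb
    refine mkNode_isHeap hal (ih har ⟨hbv, hbl, hbr⟩) ?_
    intro x hx
    rcases List.mem_append.mp hx with h | h
    · exact hav x (List.mem_append_left _ h)
    · rcases mem_lmerge.mp h with h | h
      · exact hav x (List.mem_append_right _ h)
      · rcases (by simpa [LHeap.toList] using h : x = bv ∨ x ∈ bl.toList ∨ x ∈ br.toList) with rfl | h | h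
        · omega
        · exact le_trans (by omega) (hbv x (List.mem_append_left _ h))
        · exact le_trans (by omega) (hbv x (List.mem_append_right _ h))

-- A's loop only depends on the multiset of fruits (it starts every round by sorting)
theorem comb1Loop_perm (f : Nat) {xs ys : List Int} (h : xs.Perm ys) (e : Int) :
    comb1Loop f xs e = comb1Loop f ys e := by
  cases f with
  | zero => rfl
  | succ g =>
    rw [comb1Loop, comb1Loop]
    have hl := h.length_eq
    have hs : PySem.List.sorted xs (fun x => x) false = PySem.List.sorted ys (fun x => x) false :=
      (PySem.List.sorted_id_eq_sorted_id_iff_perm xs ys).2 h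
    simp only [hl, hs]

theorem altLoop_eq_comb1Loop (t : Nat) (h : LHeap) (e : Int) (f : Nat)
    (hh : IsHeap h) (hlen : h.toList.length = t + 1) (hf : t + 1 ≤ f) :
    altLoop t h e = comb1Loop f h.toList e := by
  induction t generalizing h e f with
  | zero =>
    obtain ⟨g, rfl⟩ : ∃ g, f = g + 1 := ⟨f - 1, by omega⟩
    rw [altLoop, comb1Loop, hlen]
    simp
  | succ t ih =>
    obtain ⟨g, rfl⟩ : ∃ g, f = g + 1 := ⟨f - 1, by omega⟩
    cases h with
    | nil => simp [LHeap.toList] at hlen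
    | node m1 k l r =>
      obtain ⟨hmin, hl, hr⟩ := hh
      have hperm1 := lmerge_perm l r
      have hh1 : IsHeap (lmerge l r) := lmerge_isHeap hl hr
      have hlen1 : (lmerge l r).toList.length = t + 1 := by
        have := hperm1.length_eq
        simp [LHeap.toList] at hlen; simp [this]; omega
      cases hh1eq : lmerge l r with
      | nil => rw [hh1eq] at hlen1; simp [LHeap.toList] at hlen1
      | node m2 k2 l2 r2 =>
        rw [hh1eq] at hperm1 hh1 hlen1
        obtain ⟨hmin2, hl2, hr2⟩ := hh1
        have hperm2 := lmerge_perm l2 r2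
        have hh2 : IsHeap (lmerge l2 r2) := lmerge_isHeap hl2 hr2
        set h2 := lmerge l2 r2 with hh2eq
        set d := m1 + m2 with hd
        have hd_heap : IsHeap (LHeap.node d 1 .nil .nil) := by
          refine ⟨?_, trivial, trivial⟩; simp [LHeap.toList]
        have hh3 : IsHeap (lmerge h2 (.node d 1 .nil .nil)) := lmerge_isHeap hh2 hd_heap
        have hperm3 := lmerge_perm h2 (.node d 1 .nil .nil)
        have hlen2 : h2.toList.length = t := by
          have := hperm2.length_eq
          simp [LHeap.toList] at hlen1; simp [this]; omega
        have hlen3 : (lmerge h2 (.node d 1 .nil .nil)).toList.length = t + 1 := by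
          have := hperm3.length_eq
          simp [LHeap.toList] at this; omega
        set S := PySem.List.sorted h2.toList (fun x => x) false with hS
        have hSperm : S.Perm h2.toList := PySem.List.sorted_perm h2.toList _ _
        have hmemS : ∀ x ∈ S, x ∈ l.toList ++ r.toList := by
          intro x hx
          have : x ∈ l2.toList ++ r2.toList := hperm2.mem_iff.mp (hSperm.mem_iff.mp hx)
          exact hperm1.mem_iff.mp (by simp [LHeap.toList]; simpa [List.mem_append] using Or.inr this)
        have hm2mem : m2 ∈ l.toList ++ r.toList := by
          refine hperm1.mem_iff.mp ?_; simp [LHeap.toList]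
        have hsorted : PySem.List.sorted (LHeap.toList (.node m1 k l r)) (fun x => x) false
            = m1 :: m2 :: S := by
          apply PySem.List.sorted_id_eq_of_perm_of_pairwise
          · have pA : (m1 :: m2 :: S).Perm (m1 :: m2 :: h2.toList) := (hSperm.cons m2).cons m1
            have pB : (m1 :: m2 :: h2.toList).Perm (LHeap.toList (.node m1 k l r)) := by
              simp only [LHeap.toList]
              exact List.Perm.cons m1 ((hperm2.cons m2).trans hperm1)
            exact pA.trans pB
          · refine List.Pairwise.cons ?_ (List.Pairwise.cons ?_ ?_)
            · intro x hx
              rcases List.mem_cons.mp hx with rfl | hxS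
              · exact hmin x hm2mem
              · exact hmin x (hmemS x hxS)
            · intro x hxS
              exact hmin2 x (hperm2.mem_iff.mp (hSperm.mem_iff.mp hxS))
            · have := PySem.List.sorted_pairwise h2.toList (fun x => x)
              simpa using this
        have hstep : comb1Loop (g + 1) (LHeap.toList (.node m1 k l r)) e
            = comb1Loop g (d :: S) (e + d) := by
          rw [comb1Loop]
          have hlen' : (LHeap.toList (.node m1 k l r)).length = t + 2 := hlen
          rw [if_neg (by omega)]
          simp only [hsorted]
          simp [hd]
        have hstep2 : altLoop (t+1) (.node m1 k l r) e
            = altLoop t (lmerge h2 (.node d 1 .nil .nil)) (e + d) := by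
          rw [altLoop]
          simp only [altStep, LHeap.top, LHeap.children, hh1eq]
          rfl
        rw [hstep2, hstep, ih _ _ g hh3 hlen3 (by omega)]
        apply comb1Loop_perm
        refine hperm3.trans ?_
        simp only [LHeap.toList, List.append_nil]
        exact ((List.perm_append_singleton d _).trans (hSperm.symm.cons d)).symm.symm

theorem build_spec (fruits : List Int) : ∀ (h : LHeap), IsHeap h →
    IsHeap (fruits.foldl (fun h x => lmerge h (.node x 1 .nil .nil)) h) ∧
    (fruits.foldl (fun h x => lmerge h (.node x 1 .nil .nil)) h).toList.Perm (h.toList ++ fruits) := by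
  induction fruits with
  | nil => intro h hh; exact ⟨hh, by simp⟩
  | cons x xs ih =>
    intro h hh
    have hx : IsHeap (LHeap.node x 1 .nil .nil) := ⟨by simp [LHeap.toList], trivial, trivial⟩
    have hm : IsHeap (lmerge h (.node x 1 .nil .nil)) := lmerge_isHeap hh hx
    obtain ⟨ha, hb⟩ := ih (lmerge h (.node x 1 .nil .nil)) hm
    refine ⟨ha, ?_⟩
    simp only [List.foldl_cons]
    refine hb.trans ?_
    have := (lmerge_perm h (.node x 1 .nil .nil)).append_right xs
    refine this.trans ?_
    simp only [LHeap.toList, List.append_nil]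
    simp [List.append_assoc]

theorem comb1_spec_aux (fruits : List Int) : comb1 fruits = comb1_alt fruits := by
  by_cases h1 : fruits.length = 1
  · simp [comb1, comb1_alt, h1, altLoop]
  · cases hf : fruits with
    | nil =>
      have hnil : PySem.List.sorted ([] : List Int) (fun x => x) false = [] :=
        (PySem.List.sorted_eq_nil_iff _ _ _).mpr rfl
      simp [comb1, comb1_alt, altLoop, comb1Loop, hnil]
    | cons y ys =>
      subst hf
      obtain ⟨hh, hp⟩ := build_spec (y :: ys) .nil trivial
      set heap := (y :: ys).foldl (fun h x => lmerge h (.node x 1 .nil .nil)) .nil with hheq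
      have hlen : heap.toList.length = (y :: ys).length := by
        have := hp.length_eq; simpa [LHeap.toList] using this
      have := altLoop_eq_comb1Loop ((y :: ys).length - 1) heap 0 ((y :: ys).length + 2) hh
        (by simp only [hlen, List.length_cons]; omega) (by omega)
      rw [comb1, if_neg h1, comb1_alt]
      rw [this]
      exact (comb1Loop_perm _ (hp.trans (by simp [LHeap.toList])) 0).symm

-- ===== VERDICT (by name: the statement is the Claim_ definition above) =====
theorem comb1_spec : Claim_equal_comb1 := by
  intro fruits _
  unfold Spec_comb1
  exact comb1_spec_aux fruits
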